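-- pv_equiv track=rewrite | github.com/Zhanbin-Yeung/MMGR | data/.ipynb_checkpoints/model_train-checkpoint.py | count_duplicate_elements
-- ===== SOURCE A (Python) =====
-- def count_duplicate_elements(input_list):
--     element_count = {}
--     duplicate_count = 0
--
--     for sublist in input_list:
--         sublist_tuple = tuple(sublist)
--         if sublist_tuple in element_count:
--             element_count[sublist_tuple] += 1
--             if element_count[sublist_tuple] == 2:
--                 duplicate_count += 1
--         else:
--             element_count[sublist_tuple] = 1
--
--     return element_count, duplicate_count
-- ===== SOURCE B (Python) =====
-- def count_duplicate_elements(input_list):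
--     keys = [tuple(s) for s in input_list]
--     element_count = {k: keys.count(k) for k in dict.fromkeys(keys)}
--     duplicate_count = sum(1 for v in element_count.values() if v >= 2)
--     return element_count, duplicate_count
-- ===== Notes on version B (the rewrite author's own statement) =====
-- stated objective: alternative
-- what changed: A counts incrementally in one fused pass with an inline ==2 trigger; B instead dedups the keys in first-occurrence order (dict.fromkeys), computes each distinct key's total via list.count, and aggregates duplicates in a separate pass over the values; B trades A's single incremental pass for per-key full counts (O(n*d)).
import Mathlib
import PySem

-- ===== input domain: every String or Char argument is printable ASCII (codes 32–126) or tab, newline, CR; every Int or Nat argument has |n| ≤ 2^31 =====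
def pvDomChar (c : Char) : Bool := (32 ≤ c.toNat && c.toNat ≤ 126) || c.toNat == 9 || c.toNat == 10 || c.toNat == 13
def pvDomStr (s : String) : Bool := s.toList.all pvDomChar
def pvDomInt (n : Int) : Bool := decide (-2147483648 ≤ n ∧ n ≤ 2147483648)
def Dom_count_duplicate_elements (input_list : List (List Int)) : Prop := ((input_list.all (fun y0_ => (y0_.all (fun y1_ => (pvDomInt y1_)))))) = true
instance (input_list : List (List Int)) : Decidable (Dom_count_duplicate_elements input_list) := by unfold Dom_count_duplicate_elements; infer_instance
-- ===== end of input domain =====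

-- B replaces A's fused incremental pass (inline ==2 trigger) by: dedup the keys in
-- first-occurrence order, compute each distinct key's total with list.count, then count
-- duplicates in a separate pass over the values (alternative decomposition, not faster).

-- ===== PORT A =====
-- one pass; on a repeated key increment and bump duplicate_count exactly when the count becomes 2
def count_duplicate_elements (input_list : List (List Int)) : (List (List Int × Int)) × Int :=
  let r := input_list.foldl
    (fun (st : PySem.Dict (List Int) Int × Int) sublist =>
      match st.1.get? sublist with
      | some c =>
          (st.1.insert sublist (c + 1), if c + 1 = 2 then st.2 + 1 else st.2)
      | none => (st.1.insert sublist 1, st.2))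
    (PySem.Dict.empty, 0)
  (r.1.items, r.2)

-- ===== PORT B =====
-- {k: keys.count(k) for k in dict.fromkeys(keys)} — dict.fromkeys as PySem.List.dedup —
-- then duplicate_count = sum(1 for v in values if v >= 2)
def count_duplicate_elements_alt (input_list : List (List Int)) : (List (List Int × Int)) × Int :=
  let keys := input_list
  let ec : PySem.Dict (List Int) Int :=
    (PySem.List.dedup keys).foldl
      (fun d k => d.insert k (PySem.List.count keys k)) PySem.Dict.empty
  (ec.items, (ec.values.map (fun v => if 2 ≤ v then (1 : Int) else 0)).sum)

-- ===== PRECONDITION & SPEC =====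
def Spec_count_duplicate_elements (input_list : List (List Int)) (out : (List (List Int × Int)) × Int) : Prop := out = count_duplicate_elements_alt input_list
instance (input_list : List (List Int)) (out : (List (List Int × Int)) × Int) : Decidable (Spec_count_duplicate_elements input_list out) := by unfold Spec_count_duplicate_elements; infer_instance

-- ===== CLAIM (what is proved, stated in full; the proofs are below) =====
def Claim_equal_count_duplicate_elements : Prop := ∀ (input_list : List (List Int)), Dom_count_duplicate_elements input_list → Spec_count_duplicate_elements input_list (count_duplicate_elements input_list)

-- ===== LEMMAS AND PROOFS =====

-- A's loop body, named for the proofs (definitionally the lambda in the port)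
def stepA (st : PySem.Dict (List Int) Int × Int) (sublist : List Int) :
    PySem.Dict (List Int) Int × Int :=
  match st.1.get? sublist with
  | some c => (st.1.insert sublist (c + 1), if c + 1 = 2 then st.2 + 1 else st.2)
  | none => (st.1.insert sublist 1, st.2)

-- duplicate count read off a dict's values (B's second pass)
def pvDup (d : PySem.Dict (List Int) Int) : Int :=
  (d.values.map (fun v => if 2 ≤ v then (1 : Int) else 0)).sum

-- A's branchy step is the unconditional counting insert plus the "count just became 2" bump
lemma stepA_eq (d : PySem.Dict (List Int) Int) (dup : Int) (x : List Int) :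
    stepA (d, dup) x
      = (d.insert x (d.getD x 0 + 1), if d.getD x 0 + 1 = 2 then dup + 1 else dup) := by
  cases hg : d.get? x with
  | none =>
    have hco : d.contains x = false := by
      rw [PySem.Dict.contains_eq_isSome_get?, hg]; rfl
    have hgd : d.getD x 0 = 0 := PySem.Dict.getD_of_not_contains d 0 hco
    simp [stepA, hg, hgd]
  | some c =>
    have hgd : d.getD x 0 = c := PySem.Dict.getD_of_get?_eq_some d 0 hg
    simp [stepA, hg, hgd]

-- replacing the (unique) entry at key k by value w shifts the 0/1-sum by the two indicator values
lemma pvSum_replace (items : List (List Int × Int)) (k : List Int) (c w : Int)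
    (hmem : (k, c) ∈ items) (hnd : (items.map (·.1)).Nodup) :
    (((items.map (fun p => if p.1 == k then (k, w) else p)).map (·.2)).map
        (fun v => if 2 ≤ v then (1 : Int) else 0)).sum
      = ((items.map (·.2)).map (fun v => if 2 ≤ v then (1 : Int) else 0)).sum
        - (if 2 ≤ c then (1 : Int) else 0) + (if 2 ≤ w then (1 : Int) else 0) := by
  induction items with
  | nil => simp at hmem
  | cons p rest ih =>
    simp only [List.map_cons, List.nodup_cons, List.mem_map] at hnd
    rcases List.mem_cons.mp hmem with h | h
    · subst h
      have hq : ∀ q ∈ rest, (if q.1 == k then (k, w) else q) = id q := by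
        intro q hq
        have : q.1 ≠ k := fun he => hnd.1 ⟨q, hq, he⟩
        simp [this]
      have hrest : rest.map (fun p => if p.1 == k then (k, w) else p) = rest :=
        (List.map_congr_left hq).trans (List.map_id rest)
      simp only [List.map_cons, List.sum_cons, hrest]
      simp
      ring
    · have hp : (p.1 == k) = false := by
        simp only [beq_eq_false_iff_ne, ne_eq]
        rintro rfl
        exact hnd.1 ⟨(p.1, c), h, rfl⟩
      simp only [List.map_cons, List.sum_cons, hp, Bool.false_eq_true, if_false]
      rw [ih h hnd.2]
      ring

-- the counting insert changes pvDup by 1 exactly when the stored count passes from 1 to 2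
lemma pvDup_insert (d : PySem.Dict (List Int) Int) (x : List Int)
    (hnd : d.keys.Nodup) (hv : ∀ p ∈ d.items, 1 ≤ p.2) :
    pvDup (d.insert x (d.getD x 0 + 1))
      = (if d.getD x 0 + 1 = 2 then pvDup d + 1 else pvDup d) := by
  cases hg : d.get? x with
  | none =>
    have hco : d.contains x = false := by
      rw [PySem.Dict.contains_eq_isSome_get?, hg]; rfl
    have hgd : d.getD x 0 = 0 := PySem.Dict.getD_of_not_contains d 0 hco
    unfold pvDup
    simp only [PySem.Dict.values, hgd]
    rw [PySem.Dict.items_insert_of_not_contains d (0 + 1) hco]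
    simp
  | some c =>
    have hmem : (x, c) ∈ d.items := PySem.Dict.mem_items_of_get?_eq_some d hg
    have hc1 : 1 ≤ c := hv (x, c) hmem
    have hgd : d.getD x 0 = c := PySem.Dict.getD_of_get?_eq_some d 0 hg
    have hco : d.contains x = true := by
      rw [PySem.Dict.contains_eq_isSome_get?, hg]; rfl
    unfold pvDup
    simp only [PySem.Dict.values, hgd]
    rw [PySem.Dict.items_insert_of_contains d (c + 1) hco]
    rw [pvSum_replace d.items x c (c + 1) hmem hnd]
    split_ifs with h2 h3 h4 <;> omega

-- the loop invariant: from any well-formed dict paired with its duplicate count, A's fused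
-- fold lands on the incremental frequency table together with that table's duplicate count
lemma pvLoop (l : List (List Int)) (d : PySem.Dict (List Int) Int)
    (hnd : d.keys.Nodup) (hv : ∀ p ∈ d.items, 1 ≤ p.2) :
    l.foldl stepA (d, pvDup d)
    = (l.foldl (fun d sublist => d.insert sublist (d.getD sublist 0 + 1)) d,
       pvDup (l.foldl (fun d sublist => d.insert sublist (d.getD sublist 0 + 1)) d)) := by
  induction l generalizing d with
  | nil => simp
  | cons x xs ih =>
    simp only [List.foldl_cons, stepA_eq, ← pvDup_insert d x hnd hv]
    exact ih (d.insert x (d.getD x 0 + 1)) (PySem.Dict.nodup_keys_insert d x _ hnd)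
      (fun p hp => by
        rcases (PySem.Dict.mem_items_insert d x _ p).mp hp with h | h
        · subst h
          cases hg : d.get? x with
          | none => simp [PySem.Dict.getD_of_not_contains d 0
              (by rw [PySem.Dict.contains_eq_isSome_get?, hg]; rfl)]
          | some c =>
            have := hv (x, c) (PySem.Dict.mem_items_of_get?_eq_some d hg)
            simp only [PySem.Dict.getD_of_get?_eq_some d 0 hg]
            omega
        · exact hv p h.1)

-- B's fold over the deduped keys inserts fresh distinct keys into an empty dict:
-- its items are exactly the counter's items
lemma altDict_items (l : List (List Int)) :
    ((PySem.List.dedup l).foldl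
        (fun (d : PySem.Dict (List Int) Int) k => d.insert k (PySem.List.count l k))
        PySem.Dict.empty).items
      = (PySem.Set.ofList l).map (fun k => (k, (l.count k : Int))) := by
  have h := PySem.Dict.items_foldl_insert_fresh (l := PySem.List.dedup l)
        (k := fun x => x)
        (v := fun k => (PySem.List.count l k : Int))
        (d := PySem.Dict.empty)
        (fun a _ => PySem.Dict.contains_empty a)
        (by simp)
  rw [show (PySem.Dict.empty : PySem.Dict (List Int) Int).items = [] from rfl,
      List.nil_append] at h
  rw [h]
  simp [PySem.List.count_eq, PySem.List.dedup_eq_ofList]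

-- ===== VERDICT (by name: the statement is the Claim_ definition above) =====
theorem count_duplicate_elements_spec : Claim_equal_count_duplicate_elements := by
  intro input_list _
  unfold Spec_count_duplicate_elements count_duplicate_elements count_duplicate_elements_alt
  have h := pvLoop input_list PySem.Dict.empty (by simp) (by simp [PySem.Dict.empty])
  have h0 : pvDup PySem.Dict.empty = 0 := by simp [pvDup, PySem.Dict.empty, PySem.Dict.values]
  rw [h0] at h
  have hctr :
      input_list.foldl (fun d sublist => d.insert sublist (d.getD sublist 0 + 1))
        PySem.Dict.empty = PySem.Dict.counter input_list :=
    PySem.Dict.foldl_insert_getD_add_one_eq_counter input_list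
  have hitems :
      (input_list.foldl (fun d sublist => d.insert sublist (d.getD sublist 0 + 1))
        PySem.Dict.empty).items
        = (PySem.Set.ofList input_list).map (fun k => (k, (input_list.count k : Int))) := by
    rw [hctr]; exact PySem.Dict.items_counter input_list
  show (((input_list.foldl stepA (PySem.Dict.empty, 0)).1).items,
        (input_list.foldl stepA (PySem.Dict.empty, 0)).2) = _
  rw [h]
  simp only [pvDup, PySem.Dict.values, hitems, altDict_items]
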